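-- pv_equiv track=rewrite | github.com/jacklxc/FigureSpanDetection | util.py | to_BIO_simple
-- ===== SOURCE A (Python) =====
-- def to_BIO_simple(boolean_array):
--     BIO = []
--     prev = False
--     for element in boolean_array:
--         if element and prev:
--             BIO.append("I")
--         elif element and not prev:
--             BIO.append("B")
--             prev = True
--         else:
--             BIO.append("O")
--             prev = False
--     return BIO
-- ===== SOURCE B (Python) =====
-- def to_BIO_simple(boolean_array):
--     arr = list(boolean_array)
--     return ["I" if cur and prev else "B" if cur else "O"
--             for prev, cur in zip([False] + arr, arr)]
-- ===== Notes on version B (the rewrite author's own statement) =====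
-- stated objective: idiomatic
-- what changed: Replaces the state-threading loop (prev accumulator mutated per branch) with a stateless pairwise map over the list zipped with a previous-element view shifted by one, since prev always equals the previous element.
import Mathlib
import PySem

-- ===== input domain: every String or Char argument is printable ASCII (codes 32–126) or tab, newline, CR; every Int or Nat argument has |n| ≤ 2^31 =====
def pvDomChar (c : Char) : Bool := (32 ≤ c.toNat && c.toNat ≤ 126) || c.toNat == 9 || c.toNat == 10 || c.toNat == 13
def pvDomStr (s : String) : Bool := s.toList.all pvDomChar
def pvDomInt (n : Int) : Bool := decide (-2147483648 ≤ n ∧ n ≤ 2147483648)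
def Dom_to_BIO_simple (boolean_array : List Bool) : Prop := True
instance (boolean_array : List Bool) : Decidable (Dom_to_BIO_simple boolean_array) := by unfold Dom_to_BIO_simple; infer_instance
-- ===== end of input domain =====

-- B replaces A's prev-state-threading loop with a stateless pairwise map over consecutive elements (idiomatic).


-- ===== PORT A =====
-- fold threading the (BIO, prev) state exactly as A's loop does
def to_BIO_simple (boolean_array : List Bool) : List String :=
  (boolean_array.foldl (fun (st : List String × Bool) element =>
      if element && st.2 then (st.1 ++ ["I"], st.2)
      else if element && !st.2 then (st.1 ++ ["B"], true)
      else (st.1 ++ ["O"], false)) ([], false)).1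

-- ===== PORT B =====
-- stateless map over zip ([False] + arr, arr)
def to_BIO_simple_alt (boolean_array : List Bool) : List String :=
  ((false :: boolean_array).zip boolean_array).map
    (fun pc => if pc.2 && pc.1 then "I" else if pc.2 then "B" else "O")

-- ===== PRECONDITION & SPEC =====
def Spec_to_BIO_simple (boolean_array : List Bool) (out : List String) : Prop := out = to_BIO_simple_alt boolean_array
instance (boolean_array : List Bool) (out : List String) : Decidable (Spec_to_BIO_simple boolean_array out) := by unfold Spec_to_BIO_simple; infer_instance

-- ===== CLAIM (what is proved, stated in full; the proofs are below) =====
def Claim_equal_to_BIO_simple : Prop := ∀ (boolean_array : List Bool), Dom_to_BIO_simple boolean_array → Spec_to_BIO_simple boolean_array (to_BIO_simple boolean_array)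

-- ===== LEMMAS AND PROOFS =====

-- A's loop invariant: with pending output `acc` and state `prev`, the fold produces
-- `acc` followed by the pairwise tags of (prev :: xs) zipped with xs.
theorem to_BIO_simple_loop (xs : List Bool) : ∀ (prev : Bool) (acc : List String),
    (xs.foldl (fun (st : List String × Bool) element =>
      if element && st.2 then (st.1 ++ ["I"], st.2)
      else if element && !st.2 then (st.1 ++ ["B"], true)
      else (st.1 ++ ["O"], false)) (acc, prev)).1
    = acc ++ ((prev :: xs).zip xs).map
        (fun pc => if pc.2 && pc.1 then "I" else if pc.2 then "B" else "O") := by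
  induction xs with
  | nil => intro prev acc; simp
  | cons x xs ih =>
    intro prev acc
    cases x <;> cases prev <;> simp only [List.foldl, Bool.and_self, Bool.and_true, Bool.and_false,
        Bool.not_true, Bool.not_false, if_true, if_false, ite_true, ite_false] <;>
      rw [ih] <;> simp

-- ===== VERDICT (by name: the statement is the Claim_ definition above) =====
theorem to_BIO_simple_spec : Claim_equal_to_BIO_simple := by
  intro xs _
  unfold Spec_to_BIO_simple to_BIO_simple to_BIO_simple_alt
  simpa using to_BIO_simple_loop xs false []
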